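-- pv_equiv track=rewrite | github.com/yilinxia/RuleGoalGraph | game_prov/game_prov_color.py | get_node_colors
-- ===== SOURCE A (Python) =====
-- def find_win_pos(dict):
--     dict_values = list(dict.values())
--     # Transform each list into a set
--     sets = [set(lst) for lst in dict_values]
--
--     # Find the intersection across all sets
--     win_pos = set.intersection(*sets)
--
--     # Find the union across all sets
--     all_items = set.union(*sets)
--
--     # Subtract common_items from all_items to get not common items
--     drawn_pos = all_items - win_pos
--
--     return win_pos, drawn_pos
--
-- def find_lost_pos(input_set, win_pos, drawn_pos):
--     # Find what is not included based on common_items and not_common_items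
--     lost_pos = input_set - win_pos - drawn_pos
--
--     return lost_pos
--
-- def get_node_colors(dict, input_set):
--     win_pos, drawn_pos = find_win_pos(dict)
--     lost_pos = find_lost_pos(input_set, win_pos, drawn_pos)
--
--     color_dict = {}
--
--     for node in win_pos:
--         color_dict[node] = '#dbfdda'
--     for node in drawn_pos:
--         color_dict[node] = '#fdff94'
--     for node in lost_pos:
--         color_dict[node] = '#f77580'
--
--     return color_dict
-- ===== SOURCE B (Python) =====
-- def get_node_colors(dict, input_set):
--     sets = [set(lst) for lst in dict.values()]
--     n = len(sets)
--     cnt = {}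
--     for s in sets:
--         for node in s:
--             cnt[node] = cnt.get(node, 0) + 1
--     universe = set.union(*sets) | input_set
--     wins, draws, losts = [], [], []
--     for node in universe:
--         c = cnt.get(node, 0)
--         (wins if c == n else draws if c > 0 else losts).append(node)
--     return {node: color
--             for group, color in ((wins, '#dbfdda'), (draws, '#fdff94'), (losts, '#f77580'))
--             for node in group}
-- ===== Notes on version B (the rewrite author's own statement) =====
-- stated objective: alternative
-- what changed: Replaces A's set intersection/union/difference pipeline and its three disjoint painting loops by a single occurrence counter (how many value-lists contain each node) and one classifying pass over the universe, painting win/drawn/lost by count.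
import Mathlib
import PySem

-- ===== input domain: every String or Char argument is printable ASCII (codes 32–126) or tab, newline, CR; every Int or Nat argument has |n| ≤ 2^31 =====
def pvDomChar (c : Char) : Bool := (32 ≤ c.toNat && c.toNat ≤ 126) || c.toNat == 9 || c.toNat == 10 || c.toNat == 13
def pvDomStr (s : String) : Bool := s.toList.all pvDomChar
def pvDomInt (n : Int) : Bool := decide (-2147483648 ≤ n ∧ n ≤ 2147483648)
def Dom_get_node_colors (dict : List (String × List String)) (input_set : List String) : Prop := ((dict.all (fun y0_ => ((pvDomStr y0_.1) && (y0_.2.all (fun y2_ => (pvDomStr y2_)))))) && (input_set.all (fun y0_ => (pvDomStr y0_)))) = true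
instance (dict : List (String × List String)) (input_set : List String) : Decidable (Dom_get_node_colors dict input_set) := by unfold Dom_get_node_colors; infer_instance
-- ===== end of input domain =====

-- B replaces A's set-intersection/union/difference painting (three disjoint loops) by a single
-- occurrence-counting classification pass; objective: alternative (similar cost).
-- Output is a dict, compared as Python compares dicts (ignoring insertion order); the ports fix one order.

-- ===== PORT A =====
def get_node_colors (dict : List (String × List String)) (input_set : List String) : List (String × String) :=
  let dict_values := (PySem.Dict.ofList dict).values
  let sets := dict_values.map (fun lst => PySem.Set.ofList lst)
  match sets with
  | [] => []   -- set.intersection(*[]) raises TypeError; excluded by Pre_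
  | s0 :: rest =>
    let win_pos := rest.foldl (fun a s => PySem.Set.inter a s) s0
    let all_items := rest.foldl (fun a s => PySem.Set.union a s) s0
    let drawn_pos := PySem.Set.diff all_items win_pos
    let lost_pos := PySem.Set.diff (PySem.Set.diff input_set win_pos) drawn_pos
    let d1 := win_pos.foldl (fun d node => d.insert node "#dbfdda") (PySem.Dict.empty : PySem.Dict String String)
    let d2 := drawn_pos.foldl (fun d node => d.insert node "#fdff94") d1
    let d3 := lost_pos.foldl (fun d node => d.insert node "#f77580") d2
    d3.items

-- ===== PORT B =====
def get_node_colors_alt (dict : List (String × List String)) (input_set : List String) : List (String × String) :=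
  let sets := ((PySem.Dict.ofList dict).values).map (fun lst => PySem.Set.ofList lst)
  let n := sets.length
  let cnt := sets.foldl (fun d s => s.foldl (fun d node => d.modify node 0 (· + 1)) d)
               (PySem.Dict.empty : PySem.Dict String Int)
  match sets with
  | [] => []   -- set.union(*[]) raises TypeError; excluded by Pre_
  | s0 :: rest =>
    let univ := PySem.Set.union (rest.foldl (fun a s => PySem.Set.union a s) s0) input_set
    let groups := univ.foldl
      (fun (g : List String × List String × List String) node =>
        let c := cnt.getD node 0
        if c = (n : Int) then (g.1 ++ [node], g.2.1, g.2.2)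
        else if 0 < c then (g.1, g.2.1 ++ [node], g.2.2)
        else (g.1, g.2.1, g.2.2 ++ [node]))
      ([], [], [])
    let d := [(groups.1, "#dbfdda"), (groups.2.1, "#fdff94"), (groups.2.2, "#f77580")].foldl
      (fun d gc => gc.1.foldl (fun d node => d.insert node gc.2) d)
      (PySem.Dict.empty : PySem.Dict String String)
    d.items

-- ===== PRECONDITION & SPEC =====
-- Pre_ excludes the empty dict, on which A raises TypeError (set.intersection with no arguments),
-- and requires input_set to be a set's element list (no duplicates), per the type convention.
def Pre_get_node_colors (dict : List (String × List String)) (input_set : List String) : Prop :=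
  dict ≠ [] ∧ input_set.Nodup
instance (dict : List (String × List String)) (input_set : List String) : Decidable (Pre_get_node_colors dict input_set) := by unfold Pre_get_node_colors; infer_instance

def pvWitness_get_node_colors : (List (String × List String)) × List String :=
  ([("a", ["x", "y"]), ("b", ["y"])], ["x", "z"])

def Spec_get_node_colors (dict : List (String × List String)) (input_set : List String) (out : List (String × String)) : Prop := out = get_node_colors_alt dict input_set
instance (dict : List (String × List String)) (input_set : List String) (out : List (String × String)) : Decidable (Spec_get_node_colors dict input_set out) := by unfold Spec_get_node_colors; infer_instance

-- ===== CLAIM (what is proved, stated in full; the proofs are below) =====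
def Claim_equal_get_node_colors : Prop := ∀ (dict : List (String × List String)) (input_set : List String), Dom_get_node_colors dict input_set → Pre_get_node_colors dict input_set → Spec_get_node_colors dict input_set (get_node_colors dict input_set)

-- ===== LEMMAS AND PROOFS =====

theorem pv_foldl_inter (rest : List (PySem.Set String)) (s0 : PySem.Set String) :
    rest.foldl (fun a s => PySem.Set.inter a s) s0
      = s0.filter (fun x => rest.all (fun s => s.contains x)) := by
  induction rest generalizing s0 with
  | nil => simp
  | cons s r ih =>
    rw [List.foldl_cons, ih]
    simp only [PySem.Set.inter, List.filter_filter]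
    apply List.filter_congr
    intro x _
    simp [List.all_cons, Bool.and_comm]
theorem pv_update_prefix (xs : List String) (s : PySem.Set String) :
    ∃ e, PySem.Set.update s xs = s ++ e := by
  induction xs generalizing s with
  | nil => exact ⟨[], by simp [PySem.Set.update]⟩
  | cons x r ih =>
    have h1 : PySem.Set.update s (x :: r) = PySem.Set.update (PySem.Set.add s x) r := rfl
    by_cases hx : x ∈ s
    · rcases ih s with ⟨e, he⟩
      exact ⟨e, by rw [h1, PySem.Set.add_of_mem hx]; exact he⟩
    · rcases ih (s ++ [x]) with ⟨e, he⟩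
      refine ⟨x :: e, ?_⟩
      rw [h1, PySem.Set.add_of_not_mem hx, he, List.append_assoc]
      rfl
theorem pv_foldl_union_prefix (rest : List (PySem.Set String)) (s0 : PySem.Set String) :
    ∃ e, rest.foldl (fun a s => PySem.Set.union a s) s0 = s0 ++ e := by
  induction rest generalizing s0 with
  | nil => exact ⟨[], by simp⟩
  | cons s r ih =>
    rw [List.foldl_cons]
    rcases pv_update_prefix s s0 with ⟨e1, he1⟩
    rcases ih (PySem.Set.union s0 s) with ⟨e2, he2⟩
    refine ⟨e1 ++ e2, ?_⟩
    rw [he2, show PySem.Set.union s0 s = s0 ++ e1 from he1, List.append_assoc]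
theorem pv_foldl_union_nodup (rest : List (PySem.Set String)) (s0 : PySem.Set String)
    (h : s0.Nodup) : (rest.foldl (fun a s => PySem.Set.union a s) s0).Nodup := by
  induction rest generalizing s0 with
  | nil => exact h
  | cons s r ih => exact ih _ (PySem.Set.nodup_union _ _ h)
theorem pv_mem_foldl_union (rest : List (PySem.Set String)) (s0 : PySem.Set String) (x : String) :
    x ∈ rest.foldl (fun a s => PySem.Set.union a s) s0 ↔ x ∈ s0 ∨ ∃ s ∈ rest, x ∈ s := by
  induction rest generalizing s0 with
  | nil => simp
  | cons s r ih =>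
    rw [List.foldl_cons, ih]
    simp only [PySem.Set.mem_union]
    constructor
    · rintro (⟨h | h⟩ | ⟨t, ht, hx⟩)
      · exact Or.inl h
      · exact Or.inr ⟨s, by simp, h⟩
      · exact Or.inr ⟨t, by simp [ht], hx⟩
    · rintro (h | ⟨t, ht, hx⟩)
      · exact Or.inl (Or.inl h)
      · rcases List.mem_cons.mp ht with rfl | ht
        · exact Or.inl (Or.inr hx)
        · exact Or.inr ⟨t, ht, hx⟩
theorem pv_update_nodup_eq (xs : List String) (s : PySem.Set String) (hxs : xs.Nodup) :
    PySem.Set.update s xs = s ++ xs.filter (fun x => !s.contains x) := by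
  induction xs generalizing s with
  | nil => simp [PySem.Set.update]
  | cons x r ih =>
    have hr : r.Nodup := hxs.of_cons
    have hxr : x ∉ r := (List.nodup_cons.mp hxs).1
    have h1 : PySem.Set.update s (x :: r) = PySem.Set.update (PySem.Set.add s x) r := rfl
    by_cases hx : x ∈ s
    · rw [h1, PySem.Set.add_of_mem hx, ih s hr]
      simp [List.filter_cons, hx]
    · rw [h1, PySem.Set.add_of_not_mem hx, ih (s ++ [x]) hr]
      have hcongr : r.filter (fun y => !(s ++ [x]).contains y) = r.filter (fun y => !s.contains y) := by
        apply List.filter_congr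
        intro y hy
        have hne : y ≠ x := fun h => hxr (h ▸ hy)
        simp [hne]
      rw [hcongr]
      simp [hx]
theorem pv_getD_double_fold (S : List (List String)) (d : PySem.Dict String Int) (v : String) :
    (S.foldl (fun d s => s.foldl (fun d node => d.modify node 0 (· + 1)) d) d).getD v 0
      = d.getD v 0 + ((S.map (fun s => (s.count v : Int))).sum) := by
  induction S generalizing d with
  | nil => simp
  | cons s r ih =>
    rw [List.foldl_cons, ih, PySem.Dict.getD_foldl_modify_add_one]
    simp [add_assoc]
theorem pv_sum_count_eq_countP (S : List (List String)) (v : String)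
    (h : ∀ s ∈ S, s.Nodup) :
    ((S.map (fun s => (s.count v : Int))).sum) = (S.countP (fun s => s.contains v) : Int) := by
  induction S with
  | nil => simp
  | cons s r ih =>
    have hs : s.Nodup := h s (by simp)
    have hr := ih (fun t ht => h t (by simp [ht]))
    rw [List.map_cons, List.sum_cons, hr, List.countP_cons]
    by_cases hv : v ∈ s
    · have : s.count v = 1 := List.count_eq_one_of_mem hs hv
      simp [this, hv, add_comm]
    · have : s.count v = 0 := List.count_eq_zero.mpr hv
      simp [this, hv]
theorem pv_foldl_classify (l : List String) (p q : String → Prop)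
    [DecidablePred p] [DecidablePred q] (A B C : List String) :
    l.foldl
      (fun (g : List String × List String × List String) x =>
        if p x then (g.1 ++ [x], g.2.1, g.2.2)
        else if q x then (g.1, g.2.1 ++ [x], g.2.2)
        else (g.1, g.2.1, g.2.2 ++ [x]))
      (A, B, C)
      = (A ++ l.filter (fun x => decide (p x)),
         B ++ l.filter (fun x => !decide (p x) && decide (q x)),
         C ++ l.filter (fun x => !decide (p x) && !decide (q x))) := by
  induction l generalizing A B C with
  | nil => simp
  | cons x r ih =>
    rw [List.foldl_cons]
    by_cases hp : p x
    · rw [if_pos hp, ih]; simp [List.filter_cons, hp]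
    · by_cases hq : q x
      · rw [if_neg hp, if_pos hq, ih]; simp [List.filter_cons, hp, hq]
      · rw [if_neg hp, if_neg hq, ih]; simp [List.filter_cons, hp, hq]

theorem pv_bool_ext {a b : Bool} (h : a = true ↔ b = true) : a = b := by
  cases a <;> cases b <;> simp_all

theorem pv_contains_false (s : PySem.Set String) (x : String) :
    (PySem.Set.contains s x = false) ↔ x ∉ s := by
  rw [Bool.eq_false_iff]
  exact not_congr (PySem.Set.contains_iff s x)

theorem pv_core (s0 : PySem.Set String) (rest : List (PySem.Set String))
    (input_set : List String) (hinp : input_set.Nodup)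
    (hS : ∀ s ∈ s0 :: rest, List.Nodup s) :
    (let win_pos := rest.foldl (fun a s => PySem.Set.inter a s) s0
     let all_items := rest.foldl (fun a s => PySem.Set.union a s) s0
     let drawn_pos := PySem.Set.diff all_items win_pos
     let lost_pos := PySem.Set.diff (PySem.Set.diff input_set win_pos) drawn_pos
     let d1 := win_pos.foldl (fun d node => d.insert node "#dbfdda") (PySem.Dict.empty : PySem.Dict String String)
     let d2 := drawn_pos.foldl (fun d node => d.insert node "#fdff94") d1
     let d3 := lost_pos.foldl (fun d node => d.insert node "#f77580") d2
     d3.items)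
    = (let n := (s0 :: rest).length
       let cnt := (s0 :: rest).foldl (fun d s => s.foldl (fun d node => d.modify node 0 (· + 1)) d)
                    (PySem.Dict.empty : PySem.Dict String Int)
       let univ := PySem.Set.union (rest.foldl (fun a s => PySem.Set.union a s) s0) input_set
       let groups := univ.foldl
         (fun (g : List String × List String × List String) node =>
           let c := cnt.getD node 0
           if c = (n : Int) then (g.1 ++ [node], g.2.1, g.2.2)
           else if 0 < c then (g.1, g.2.1 ++ [node], g.2.2)
           else (g.1, g.2.1, g.2.2 ++ [node]))
         ([], [], [])
       let d := [(groups.1, "#dbfdda"), (groups.2.1, "#fdff94"), (groups.2.2, "#f77580")].foldl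
         (fun d gc => gc.1.foldl (fun d node => d.insert node gc.2) d)
         (PySem.Dict.empty : PySem.Dict String String)
       d.items) := by
  dsimp only
  have hs0 : s0.Nodup := hS s0 (by simp)
  set U := rest.foldl (fun a s => PySem.Set.union a s) s0 with hUdef
  set I := rest.foldl (fun a s => PySem.Set.inter a s) s0 with hIdef
  set cnt := (s0 :: rest).foldl (fun d s => s.foldl (fun d node => d.modify node 0 (· + 1)) d)
               (PySem.Dict.empty : PySem.Dict String Int) with hcntdef
  obtain ⟨e, hUe⟩ := pv_foldl_union_prefix rest s0
  rw [← hUdef] at hUe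
  have hUnd : U.Nodup := pv_foldl_union_nodup rest s0 hs0
  have hUmem : ∀ x, x ∈ U ↔ x ∈ s0 ∨ ∃ s ∈ rest, x ∈ s := pv_mem_foldl_union rest s0
  -- count characterisation
  have hocc : ∀ x, cnt.getD x 0 = ((s0 :: rest).countP (fun s => s.contains x) : Int) := by
    intro x
    rw [hcntdef, pv_getD_double_fold, pv_sum_count_eq_countP _ _ hS]
    simp
  have hwin_iff : ∀ x, (cnt.getD x 0 = ((s0 :: rest).length : Int)) ↔ ∀ s ∈ s0 :: rest, x ∈ s := by
    intro x
    rw [hocc, Int.natCast_inj, List.countP_eq_length]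
    constructor
    · intro h s hs; simpa using h s hs
    · intro h s hs; simpa using h s hs
  have hpos_iff : ∀ x, (0 < cnt.getD x 0) ↔ x ∈ U := by
    intro x
    rw [hocc]
    rw [show ((0 : Int) < ((s0 :: rest).countP (fun s => s.contains x) : Int)) ↔
        0 < (s0 :: rest).countP (fun s => s.contains x) from by exact_mod_cast Iff.rfl]
    rw [List.countP_pos_iff, hUmem]
    constructor
    · rintro ⟨s, hs, hc⟩
      rcases List.mem_cons.mp hs with rfl | hs
      · exact Or.inl (by simpa using hc)
      · exact Or.inr ⟨s, hs, by simpa using hc⟩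
    · rintro (h | ⟨s, hs, hc⟩)
      · exact ⟨s0, by simp, by simpa using h⟩
      · exact ⟨s, by simp [hs], by simpa using hc⟩
  -- A's three lists
  have hI : I = U.filter (fun x => (s0 :: rest).all (fun s => s.contains x)) := by
    rw [hIdef, pv_foldl_inter, hUe, List.filter_append]
    have he0 : e.filter (fun x => (s0 :: rest).all (fun s => s.contains x)) = [] := by
      apply List.filter_eq_nil_iff.mpr
      intro x hx
      have hxs0 : x ∉ s0 := by
        have := hUnd
        rw [hUe] at this
        exact fun h => (List.disjoint_of_nodup_append this) h hx
      simp [List.all_cons]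
      intro h
      exact absurd h hxs0
    rw [he0, List.append_nil]
    apply List.filter_congr
    intro x hx
    simp [List.all_cons, hx]
  have hD : PySem.Set.diff U I = U.filter (fun x => !(s0 :: rest).all (fun s => s.contains x)) := by
    unfold PySem.Set.diff
    apply List.filter_congr
    intro x hxU
    have hiff : (x ∈ I) ↔ ((s0 :: rest).all (fun s => s.contains x) = true) := by
      rw [hI, List.mem_filter]
      simp [hxU]
    apply congrArg (fun b => !b)
    apply pv_bool_ext
    rw [PySem.Set.contains_iff]
    exact hiff
  have hL : PySem.Set.diff (PySem.Set.diff input_set I) (PySem.Set.diff U I)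
      = input_set.filter (fun x => !U.contains x) := by
    unfold PySem.Set.diff
    rw [List.filter_filter]
    apply List.filter_congr
    intro x _
    apply pv_bool_ext
    simp only [Bool.and_eq_true, Bool.not_eq_true', pv_contains_false]
    by_cases hxU : x ∈ U
    · by_cases hxI : x ∈ I
      · simp [hxI, hxU]
      · have hxD2 : x ∈ List.filter (fun y => !PySem.Set.contains I y) U :=
          List.mem_filter.mpr ⟨hxU, by simpa [pv_contains_false, Bool.not_eq_true'] using hxI⟩
        simp [hxD2, hxU]
    · have hxI : x ∉ I := by
        rw [hI, List.mem_filter]; rintro ⟨h, -⟩; exact hxU h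
      have hxD2 : x ∉ List.filter (fun y => !PySem.Set.contains I y) U := by
        intro h; exact hxU (List.mem_filter.mp h).1
      simp [hxU, hxI, hxD2]
  -- B's universe and groups
  have hUniv : PySem.Set.union U input_set = U ++ input_set.filter (fun x => !U.contains x) := by
    show PySem.Set.update U input_set = _
    exact pv_update_nodup_eq input_set U hinp
  have hclass := pv_foldl_classify (PySem.Set.union U input_set)
      (fun x => cnt.getD x 0 = (((s0 :: rest).length : Nat) : Int))
      (fun x => 0 < cnt.getD x 0) [] [] []
  -- three filter equalities
  have hwin : (PySem.Set.union U input_set).filter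
      (fun x => decide (cnt.getD x 0 = (((s0 :: rest).length : Nat) : Int))) = I := by
    rw [hUniv, List.filter_append]
    have h2 : (input_set.filter (fun x => !U.contains x)).filter
        (fun x => decide (cnt.getD x 0 = (((s0 :: rest).length : Nat) : Int))) = [] := by
      apply List.filter_eq_nil_iff.mpr
      intro x hx
      have hxU : x ∉ U := by
        have := (List.mem_filter.mp hx).2
        simpa using this
      simp only [decide_eq_true_eq]
      intro hEq
      exact hxU ((hUmem x).mpr (Or.inl ((hwin_iff x).mp hEq s0 (by simp))))
    rw [h2, List.append_nil, hI]
    apply List.filter_congr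
    intro x _
    apply pv_bool_ext
    simp only [decide_eq_true_eq, List.all_eq_true, PySem.Set.contains_iff]
    exact hwin_iff x
  have hdraw : (PySem.Set.union U input_set).filter
      (fun x => !decide (cnt.getD x 0 = (((s0 :: rest).length : Nat) : Int)) && decide (0 < cnt.getD x 0))
      = PySem.Set.diff U I := by
    rw [hUniv, List.filter_append, hD]
    have h2 : (input_set.filter (fun x => !U.contains x)).filter
        (fun x => !decide (cnt.getD x 0 = (((s0 :: rest).length : Nat) : Int)) && decide (0 < cnt.getD x 0)) = [] := by
      apply List.filter_eq_nil_iff.mpr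
      intro x hx
      have hxU : x ∉ U := by
        have := (List.mem_filter.mp hx).2
        simpa using this
      simp only [Bool.and_eq_true, decide_eq_true_eq]
      rintro ⟨-, hpos⟩
      exact hxU ((hpos_iff x).mp hpos)
    rw [h2, List.append_nil]
    apply List.filter_congr
    intro x hxU
    have hpos : (0 < cnt.getD x 0) := (hpos_iff x).mpr hxU
    apply pv_bool_ext
    simp only [Bool.and_eq_true, Bool.not_eq_true', decide_eq_false_iff_not,
      decide_eq_true_eq, List.all_eq_true, PySem.Set.contains_iff]
    rw [List.all_eq_false]
    constructor
    · rintro ⟨hnw, -⟩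
      by_contra hno
      push_neg at hno
      exact hnw ((hwin_iff x).mpr (by
        intro s hs
        exact (PySem.Set.contains_iff s x).mp (hno s hs)))
    · rintro ⟨s, hs, hxs⟩
      refine ⟨fun hw => hxs ?_, hpos⟩
      exact (PySem.Set.contains_iff s x).mpr ((hwin_iff x).mp hw s hs)
  have hlost : (PySem.Set.union U input_set).filter
      (fun x => !decide (cnt.getD x 0 = (((s0 :: rest).length : Nat) : Int)) && !decide (0 < cnt.getD x 0))
      = PySem.Set.diff (PySem.Set.diff input_set I) (PySem.Set.diff U I) := by
    rw [hUniv, List.filter_append, hL]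
    have h1 : U.filter
        (fun x => !decide (cnt.getD x 0 = (((s0 :: rest).length : Nat) : Int)) && !decide (0 < cnt.getD x 0)) = [] := by
      apply List.filter_eq_nil_iff.mpr
      intro x hx
      have hpos : (0 < cnt.getD x 0) := (hpos_iff x).mpr hx
      simp [hpos]
    rw [h1, List.nil_append]
    apply List.filter_eq_self.mpr
    intro x hx
    have hxU : x ∉ U := by
      have := (List.mem_filter.mp hx).2
      simpa using this
    have hnpos : ¬ (0 < cnt.getD x 0) := fun h => hxU ((hpos_iff x).mp h)
    have hneq : ¬ (cnt.getD x 0 = (((s0 :: rest).length : Nat) : Int)) := fun h =>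
      hxU ((hUmem x).mpr (Or.inl ((hwin_iff x).mp h s0 (by simp))))
    simp only [Bool.and_eq_true, Bool.not_eq_true', decide_eq_false_iff_not]
    exact ⟨hneq, hnpos⟩
  -- assemble
  rw [hclass]
  simp only [List.foldl_cons, List.foldl_nil, List.nil_append]
  rw [hwin, hdraw, hlost]

theorem pv_values_ne_nil (dict : List (String × List String)) (h : dict ≠ []) :
    (PySem.Dict.ofList dict).values ≠ [] := by
  cases dict with
  | nil => exact absurd rfl h
  | cons p r =>
    have hk : (PySem.Dict.ofList (p :: r)).keys = PySem.Set.update [] ((p :: r).map Prod.fst) := by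
      have := PySem.Dict.keys_foldl_insert_key (p :: r) Prod.fst
        (fun _ x => x.2) (PySem.Dict.empty : PySem.Dict String (List String))
      simpa [PySem.Dict.ofList, PySem.Dict.update] using this
    have hmem : p.1 ∈ (PySem.Dict.ofList (p :: r)).keys := by
      rw [hk, PySem.Set.update_nil_left]
      exact (PySem.Set.mem_ofList _ _).mpr (by simp)
    intro hcon
    have hitems : (PySem.Dict.ofList (p :: r)).items = [] := by
      have := congrArg List.length hcon
      simp only [PySem.Dict.values, List.length_map] at this
      exact List.eq_nil_of_length_eq_zero this
    rw [PySem.Dict.keys, hitems] at hmem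
    simp at hmem

-- ===== VERDICT (by name: the statement is the Claim_ definition above) =====
theorem get_node_colors_spec : Claim_equal_get_node_colors := by
  intro dict input_set _hdom hpre
  obtain ⟨hne, hinp⟩ := hpre
  unfold Spec_get_node_colors get_node_colors get_node_colors_alt
  have hvals := pv_values_ne_nil dict hne
  cases hsets : ((PySem.Dict.ofList dict).values).map (fun lst => PySem.Set.ofList lst) with
  | nil => simp at hsets; simp [hsets] at hvals
  | cons s0 rest =>
    simp only [hsets]
    have hS : ∀ s ∈ s0 :: rest, List.Nodup s := by
      intro s hs
      rw [← hsets] at hs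
      obtain ⟨lst, _, rfl⟩ := List.mem_map.mp hs
      exact PySem.Set.nodup_ofList lst
    exact pv_core s0 rest input_set hinp hS
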